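-- pv_equiv track=rewrite | github.com/JJuHS/python_ssafy | python_ssafy/python_ssafy/swea/19975.py | del_word
-- ===== SOURCE A (Python) =====
-- def del_word(word_):
--     if len(word_) == 0:
--         return 0
--     if len(word_) == 1:
--         return 1
--
--     for i in range(len(word_) - 1):
--         if word_[i] == word_[i + 1]:
--             word_.pop(i)
--             word_.pop(i)
--             del_word(word_)
--             break
--
--     return len(word_)
-- ===== SOURCE B (Python) =====
-- def del_word(word_):
--     stack = []
--     for c in word_:
--         if stack and stack[-1] == c:
--             stack.pop()
--         else:
--             stack.append(c)
--     return len(stack)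
-- ===== Notes on version B (the rewrite author's own statement) =====
-- stated objective: faster
-- what changed: Replaces the quadratic scan-remove-recurse pair cancellation with a single-pass stack (push, or pop when equal to the top) and returns the stack size.
import Mathlib
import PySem

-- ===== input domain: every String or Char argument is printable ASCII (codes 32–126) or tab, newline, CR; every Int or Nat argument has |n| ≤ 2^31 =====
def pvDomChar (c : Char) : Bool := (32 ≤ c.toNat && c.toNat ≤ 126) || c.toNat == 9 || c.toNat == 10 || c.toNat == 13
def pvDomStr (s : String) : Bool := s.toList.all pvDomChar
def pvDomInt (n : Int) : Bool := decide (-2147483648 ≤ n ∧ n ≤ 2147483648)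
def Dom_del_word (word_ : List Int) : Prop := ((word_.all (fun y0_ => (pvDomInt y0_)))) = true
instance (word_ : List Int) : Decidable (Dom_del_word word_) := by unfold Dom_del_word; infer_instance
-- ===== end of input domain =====

-- B replaces A's quadratic remove-first-adjacent-pair-and-recurse with a one-pass stack; faster (asymptotic).
-- A mutates its argument in place (pops elements); the equivalence proved here is about the return value only.

-- ===== PORT A =====
-- A's for-loop scans for the first adjacent equal pair; pvPopPair returns the list with that
-- first pair removed (word_.pop(i) twice), or none if the loop finds no pair.
def pvPopPair : List Int → Option (List Int)
  | a :: b :: rest => if a = b then some rest else (pvPopPair (b :: rest)).map (a :: ·)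
  | _ => none

theorem pvPopPair_length : ∀ (w w' : List Int), pvPopPair w = some w' → w'.length + 2 = w.length := by
  intro w
  induction w with
  | nil => intro w' h; simp [pvPopPair] at h
  | cons a t ih =>
    intro w' h
    match t, ih with
    | [], _ => simp [pvPopPair] at h
    | b :: rest, ih =>
      by_cases hab : a = b
      · simp [pvPopPair, hab] at h; subst h; simp
      · simp [pvPopPair, hab] at h
        obtain ⟨v, hv, rfl⟩ := h
        have := ih v hv
        simp at this ⊢
        omega

def del_word (word_ : List Int) : Int :=
  if word_.length = 0 then 0
  else if word_.length = 1 then 1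
  else
    match h : pvPopPair word_ with
    | some w' => del_word w'   -- A recurses on the mutated list and returns its (final) length
    | none => (word_.length : Int)
termination_by word_.length
decreasing_by
  have := pvPopPair_length word_ w' h
  omega

-- ===== PORT B =====
def pvStep (st : List Int) (c : Int) : List Int :=
  match st with
  | t :: ts => if t = c then ts else c :: t :: ts
  | [] => [c]

def del_word_alt (word_ : List Int) : Int :=
  ((word_.foldl pvStep []).length : Int)

-- ===== PRECONDITION & SPEC =====
def Spec_del_word (word_ : List Int) (out : Int) : Prop := out = del_word_alt word_
instance (word_ : List Int) (out : Int) : Decidable (Spec_del_word word_ out) := by unfold Spec_del_word; infer_instance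

-- ===== CLAIM (what is proved, stated in full; the proofs are below) =====
def Claim_equal_del_word : Prop := ∀ (word_ : List Int), Dom_del_word word_ → Spec_del_word word_ (del_word word_)

-- ===== LEMMAS AND PROOFS =====

-- the stack never holds two adjacent equal elements
theorem pvStep_inv (st : List Int) (c : Int) (h : st.IsChain (· ≠ ·)) :
    (pvStep st c).IsChain (· ≠ ·) := by
  match st with
  | [] => simp [pvStep]
  | t :: ts =>
    by_cases htc : t = c
    · simp only [pvStep, if_pos htc]
      match ts with
      | [] => simp
      | u :: us => exact (List.isChain_cons_cons.mp h).2
    · simpa [pvStep, htc] using List.isChain_cons_cons.mpr ⟨Ne.symm htc, h⟩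

-- processing the same element twice in a row is a no-op on an adjacent-distinct stack
theorem pvStep_double (st : List Int) (a : Int) (h : st.IsChain (· ≠ ·)) :
    pvStep (pvStep st a) a = st := by
  match st with
  | [] => simp [pvStep]
  | t :: ts =>
    by_cases hta : t = a
    · subst hta
      match ts with
      | [] => simp [pvStep]
      | u :: us =>
        have htu : t ≠ u := (List.isChain_cons_cons.mp h).1
        simp [pvStep, (Ne.symm htu : u ≠ t)]
    · simp [pvStep, hta]

-- removing the first adjacent equal pair does not change the fold
theorem pvFold_popPair : ∀ (w w' st : List Int), st.IsChain (· ≠ ·) →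
    pvPopPair w = some w' → w.foldl pvStep st = w'.foldl pvStep st := by
  intro w
  induction w with
  | nil => intro w' st _ h; simp [pvPopPair] at h
  | cons a t ih =>
    intro w' st hst h
    match t, ih with
    | [], _ => simp [pvPopPair] at h
    | b :: rest, ih =>
      by_cases hab : a = b
      · simp [pvPopPair, hab] at h
        subst h hab
        simp [List.foldl, pvStep_double st a hst]
      · simp [pvPopPair, hab] at h
        obtain ⟨v, hv, rfl⟩ := h
        simp only [List.foldl]
        exact ih v (pvStep st a) (pvStep_inv st a hst) hv

-- if A's scan finds no pair, the word itself has no adjacent duplicates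
theorem pvPopPair_none : ∀ (w : List Int), pvPopPair w = none → w.IsChain (· ≠ ·) := by
  intro w
  induction w with
  | nil => intro _; simp
  | cons a t ih =>
    intro h
    match t, ih with
    | [], _ => simp
    | b :: rest, ih =>
      by_cases hab : a = b
      · simp [pvPopPair, hab] at h
      · simp [pvPopPair, hab] at h
        exact List.isChain_cons_cons.mpr ⟨hab, ih h⟩

-- on an adjacent-distinct word the stack just accumulates everything
theorem pvFold_chain : ∀ (w : List Int) (a : Int) (st : List Int),
    (a :: w).IsChain (· ≠ ·) → w.foldl pvStep (a :: st) = w.reverse ++ a :: st := by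
  intro w
  induction w with
  | nil => intro a st _; simp
  | cons b rest ih =>
    intro a st h
    have hab : a ≠ b := (List.isChain_cons_cons.mp h).1
    simp only [List.foldl, pvStep, if_neg hab]
    rw [ih b (a :: st) (List.isChain_cons_cons.mp h).2]
    simp

theorem del_word_eq : ∀ (n : ℕ) (w : List Int), w.length ≤ n →
    del_word w = ((w.foldl pvStep []).length : Int) := by
  intro n
  induction n with
  | zero =>
    intro w hw
    have : w = [] := List.eq_nil_of_length_eq_zero (Nat.le_zero.mp hw)
    subst this
    simp [del_word]
  | succ n ih =>
    intro w hw
    rw [del_word]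
    by_cases h0 : w.length = 0
    · have : w = [] := List.eq_nil_of_length_eq_zero h0
      subst this; simp
    · by_cases h1 : w.length = 1
      · match w, h1 with
        | [a], _ => simp [pvStep]
      · simp only [if_neg h0, if_neg h1]
        split
        next w' hp =>
          have hl := pvPopPair_length w w' hp
          rw [ih w' (by omega), pvFold_popPair w w' [] (by simp) hp]
        next hp =>
          have hc := pvPopPair_none w hp
          match w, hc with
          | [], _ => simp at h0
          | a :: rest, hc =>
            have : (a :: rest).foldl pvStep [] = rest.reverse ++ [a] := by
              simpa [pvStep] using pvFold_chain rest a [] hc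
            simp [this]

-- ===== VERDICT (by name: the statement is the Claim_ definition above) =====
theorem del_word_spec : Claim_equal_del_word := by
  intro w _
  unfold Spec_del_word del_word_alt
  exact del_word_eq w.length w le_rfl
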